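-- pv_equiv track=rewrite | github.com/rostyslavborovyk/fastapi-stomp | fastapi_stomp/util/frames.py | parse_from_text
-- ===== SOURCE A (Python) =====
-- def parse_from_text(message: str):
--     """
--     Called to unpack a STOMP message into a dictionary.
--     """
--     headers = {}
--     body = []
--
--     breakdown = message.split('\n')
--
--     # Get the message command:
--     cmd = breakdown[0]
--     breakdown = breakdown[1:]
--
--     def head_data(f):
--         # find the first ':' everything to the left of this is a
--         # header, everything to the right is data:
--         index = f.find(':')
--         if index:
--             header = f[:index].strip()
--             data = f[index+1:].strip()
--             headers[header.strip()] = data.strip()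
--
--     def body_data(f):
--         f = f.strip()
--         if f:
--             body.append(f)
--
--     # Recover the header fields and body data
--     handler = head_data
--     for field in breakdown:
--         if field.strip() == '':
--             # End of headers, if body data next.
--             handler = body_data
--             continue
--
--         handler(field)
--
--     body = "".join(body)
--     body = body.replace('\x00', '')
--     return cmd, headers, body
-- ===== SOURCE B (Python) =====
-- def parse_from_text(message: str):
--     """
--     Called to unpack a STOMP message into a dictionary.
--     """
--     lines = message.split('\n')
--     cmd = lines[0]
--     rest = lines[1:]
--
--     # Split at the first blank (whitespace-only) line: headers before, body after.
--     split = next((i for i, l in enumerate(rest) if l.strip() == ''), None)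
--     if split is None:
--         header_lines, body_lines = rest, []
--     else:
--         header_lines, body_lines = rest[:split], rest[split + 1:]
--
--     headers = {}
--     for f in header_lines:
--         index = f.find(':')
--         if index:  # preserve original semantics: colon at position 0 skips the line
--             headers[f[:index].strip()] = f[index + 1:].strip()
--
--     body = ''.join(l.strip() for l in body_lines if l.strip()).replace('\x00', '')
--     return cmd, headers, body
-- ===== Notes on version B (the rewrite author's own statement) =====
-- stated objective: simpler
-- what changed: A drives one loop over the lines through a mutable handler-switching state machine; B first finds the index of the first blank line, then parses the prefix as headers and the suffix as body in two independent passes.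
import Mathlib
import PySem

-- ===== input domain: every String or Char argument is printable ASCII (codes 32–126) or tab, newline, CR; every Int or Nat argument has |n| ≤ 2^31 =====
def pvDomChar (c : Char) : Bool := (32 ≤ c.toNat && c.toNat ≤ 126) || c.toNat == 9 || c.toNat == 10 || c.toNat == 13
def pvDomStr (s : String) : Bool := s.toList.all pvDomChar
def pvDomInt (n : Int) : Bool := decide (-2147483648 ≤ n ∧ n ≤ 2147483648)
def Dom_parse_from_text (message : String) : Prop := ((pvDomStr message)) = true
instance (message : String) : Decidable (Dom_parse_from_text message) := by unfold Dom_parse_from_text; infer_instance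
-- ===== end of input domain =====

-- B replaces A's mutable handler-switching state machine by locating the first blank line
-- and parsing the header prefix / body suffix separately (same cost, plainer decomposition).

-- ===== PORT A =====
-- head_data: headers[f[:f.find(':')].strip().strip()] = f[f.find(':')+1:].strip().strip() when find ≠ 0
def pvHeadA (headers : PySem.Dict String String) (f : String) : PySem.Dict String String :=
  let index := PySem.Str.find f ":"
  if index ≠ 0 then
    let header := PySem.Str.strip (PySem.Str.slice f none (some index))
    let data := PySem.Str.strip (PySem.Str.slice f (some (index + 1)) none)
    headers.insert (PySem.Str.strip header) (PySem.Str.strip data)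
  else headers

-- the for-loop over the remaining fields with the mutable 'handler' flag (false = head_data)
def pvLoopA (fields : List String) (headers : PySem.Dict String String)
    (body : List String) (isBody : Bool) : PySem.Dict String String × List String :=
  match fields with
  | [] => (headers, body)
  | f :: fs =>
    if PySem.Str.strip f = "" then pvLoopA fs headers body true
    else if isBody then
      let s := PySem.Str.strip f
      pvLoopA fs headers (if s ≠ "" then body ++ [s] else body) isBody
    else pvLoopA fs (pvHeadA headers f) body isBody

def parse_from_text (message : String) : String × (List (String × String)) × String :=
  let breakdown := (PySem.Str.split? message "\n").getD [""]
  let cmd := (PySem.List.pyGet? breakdown 0).getD ""  -- split always yields ≥ 1 piece, so breakdown[0] never raises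
  let breakdown := PySem.List.slice breakdown (some 1) none
  let hb := pvLoopA breakdown PySem.Dict.empty [] false
  let body := PySem.Str.replace (PySem.Str.join "" hb.2) "\x00" ""
  (cmd, hb.1.items, body)

-- ===== PORT B =====
def pvHeadB (headers : PySem.Dict String String) (f : String) : PySem.Dict String String :=
  let index := PySem.Str.find f ":"
  if index ≠ 0 then
    headers.insert (PySem.Str.strip (PySem.Str.slice f none (some index)))
      (PySem.Str.strip (PySem.Str.slice f (some (index + 1)) none))
  else headers

def pvBodyLine (l : String) : Option String :=
  let s := PySem.Str.strip l
  if s = "" then none else some s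

def parse_from_text_alt (message : String) : String × (List (String × String)) × String :=
  let lines := (PySem.Str.split? message "\n").getD [""]
  let cmd := (PySem.List.pyGet? lines 0).getD ""  -- split always yields ≥ 1 piece
  let rest := PySem.List.slice lines (some 1) none
  let hb : List String × List String :=
    match rest.findIdx? (fun l => PySem.Str.strip l == "") with
    | none => (rest, [])
    | some i => (rest.take i, rest.drop (i + 1))
  let headers := hb.1.foldl pvHeadB PySem.Dict.empty
  let body := PySem.Str.replace (PySem.Str.join "" (hb.2.filterMap pvBodyLine)) "\x00" ""
  (cmd, headers.items, body)

-- ===== PRECONDITION & SPEC =====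
def Spec_parse_from_text (message : String) (out : String × (List (String × String)) × String) : Prop := out = parse_from_text_alt message
instance (message : String) (out : String × (List (String × String)) × String) : Decidable (Spec_parse_from_text message out) := by unfold Spec_parse_from_text; infer_instance

-- ===== CLAIM (what is proved, stated in full; the proofs are below) =====
def Claim_equal_parse_from_text : Prop := ∀ (message : String), Dom_parse_from_text message → Spec_parse_from_text message (parse_from_text message)

-- ===== LEMMAS AND PROOFS =====

theorem pv_dropWhile_idem {α : Type} (p : α → Bool) (l : List α) :
    List.dropWhile p (List.dropWhile p l) = List.dropWhile p l := by
  induction l with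
  | nil => rfl
  | cons a as ih =>
    by_cases h : p a = true
    · simpa [h] using ih
    · simp [h]

theorem pv_head_dropWhile {α : Type} (p : α → Bool) (l : List α) (a : α) (as : List α)
    (h : List.dropWhile p l = a :: as) : p a = false := by
  induction l with
  | nil => simp at h
  | cons x xs ih =>
    rw [List.dropWhile_cons] at h
    by_cases hx : p x = true
    · rw [if_pos hx] at h; exact ih h
    · rw [if_neg hx] at h; cases h; simpa using hx

theorem pv_dropWhile_eq_self_of_head {α : Type} (p : α → Bool) (l : List α)
    (h : ∀ a as, l = a :: as → p a = false) : List.dropWhile p l = l := by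
  cases l with
  | nil => rfl
  | cons a as => rw [List.dropWhile_cons, if_neg (by simp [h a as rfl])]

theorem pv_rstrip_prefix (t : List Char) : PySem.Chars.rstrip t <+: t := by
  have := List.dropWhile_suffix (l := t.reverse) PySem.Chars.isspace
  have h2 : (List.dropWhile PySem.Chars.isspace t.reverse).reverse <+: t.reverse.reverse :=
    List.reverse_prefix.mpr this
  simpa [PySem.Chars.rstrip] using h2

theorem pv_lstrip_rstrip_lstrip (x : List Char) :
    PySem.Chars.lstrip (PySem.Chars.rstrip (PySem.Chars.lstrip x)) =
      PySem.Chars.rstrip (PySem.Chars.lstrip x) := by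
  apply pv_dropWhile_eq_self_of_head
  intro a as h
  have hpre := pv_rstrip_prefix (PySem.Chars.lstrip x)
  rw [h] at hpre
  obtain ⟨u, hu⟩ := hpre
  have : List.dropWhile PySem.Chars.isspace x = a :: (as ++ u) := by
    simpa [PySem.Chars.lstrip] using hu.symm
  exact pv_head_dropWhile _ _ _ _ this

theorem pv_rstrip_idem (y : List Char) :
    PySem.Chars.rstrip (PySem.Chars.rstrip y) = PySem.Chars.rstrip y := by
  simp [PySem.Chars.rstrip, pv_dropWhile_idem]

theorem pv_chars_strip_idem (cs : List Char) :
    PySem.Chars.strip (PySem.Chars.strip cs) = PySem.Chars.strip cs := by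
  simp only [PySem.Chars.strip]
  rw [pv_lstrip_rstrip_lstrip, pv_rstrip_idem]

theorem pv_str_strip_idem (s : String) :
    PySem.Str.strip (PySem.Str.strip s) = PySem.Str.strip s := by
  apply String.toList_inj.mp
  rw [PySem.Str.toList_strip, PySem.Str.toList_strip, pv_chars_strip_idem]

theorem pvHeadA_eq (h : PySem.Dict String String) (f : String) : pvHeadA h f = pvHeadB h f := by
  simp only [pvHeadA, pvHeadB, pv_str_strip_idem]

theorem pv_foldl_eq (l : List String) (d : PySem.Dict String String) :
    l.foldl pvHeadA d = l.foldl pvHeadB d :=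
  PySem.List.foldl_congr_mem l pvHeadA pvHeadB d (fun acc x _ => pvHeadA_eq acc x)

theorem pvLoopA_body (fs : List String) (h : PySem.Dict String String) (b : List String) :
    pvLoopA fs h b true = (h, b ++ fs.filterMap pvBodyLine) := by
  induction fs generalizing b with
  | nil => simp [pvLoopA]
  | cons f fs ih =>
    by_cases hf : PySem.Str.strip f = ""
    · simp [pvLoopA, hf, ih, pvBodyLine]
    · simp [pvLoopA, hf, ih, pvBodyLine]

theorem pvLoopA_split (fs : List String) (h : PySem.Dict String String) (b : List String) :
    pvLoopA fs h b false =
      match fs.findIdx? (fun l => PySem.Str.strip l == "") with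
      | none => (fs.foldl pvHeadA h, b)
      | some i => ((fs.take i).foldl pvHeadA h, b ++ (fs.drop (i + 1)).filterMap pvBodyLine) := by
  induction fs generalizing h with
  | nil => simp [pvLoopA]
  | cons f fs ih =>
    rw [List.findIdx?_cons]
    by_cases hf : PySem.Str.strip f = ""
    · simp [pvLoopA, hf, pvLoopA_body]
    · have hb : (PySem.Str.strip f == "") = false := by simp [hf]
      rw [hb]
      simp only [Bool.false_eq_true, if_false]
      have hstep : pvLoopA (f :: fs) h b false = pvLoopA fs (pvHeadA h f) b false := by
        simp [pvLoopA, hf]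
      rw [hstep, ih]
      cases hfi : fs.findIdx? (fun l => PySem.Str.strip l == "") with
      | none => simp
      | some i => simp

-- ===== VERDICT (by name: the statement is the Claim_ definition above) =====
theorem parse_from_text_spec : Claim_equal_parse_from_text := by
  intro message _
  unfold Spec_parse_from_text parse_from_text parse_from_text_alt
  simp only [pvLoopA_split]
  cases hfi : (PySem.List.slice ((PySem.Str.split? message "\n").getD [""]) (some 1) none).findIdx?
      (fun l => PySem.Str.strip l == "") with
  | none => simp only [pv_foldl_eq, List.filterMap_nil]
  | some i => simp only [pv_foldl_eq, List.nil_append]
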